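-- pv_equiv track=rewrite | github.com/ICAMS/amstools | amstools/cli/ams_dft_manager.py | aggregate_calculations_status
-- ===== SOURCE A (Python) =====
-- def aggregate_calculations_status(state_dict):
--     is_any_submitted_calculations = False
--     is_all_finished = True
--     for cur_dir, cur_state in state_dict.items():
--         status = cur_state.get("status")
--         if status != "finished":
--             is_all_finished = False
--         if status == "submitted":
--             is_any_submitted_calculations = True
--     return is_all_finished, is_any_submitted_calculations
-- ===== SOURCE B (Python) =====
-- def aggregate_calculations_status(state_dict):
--     counts = {}
--     for cur_state in state_dict.values():
--         s = cur_state.get("status")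
--         counts[s] = counts.get(s, 0) + 1
--     return (counts.get("finished", 0) == len(state_dict),
--             counts.get("submitted", 0) > 0)
-- ===== Notes on version B (the rewrite author's own statement) =====
-- stated objective: alternative
-- what changed: B replaces A's per-element branching scan holding two boolean flags with a tally-then-derive structure: one pass builds a frequency table of status values, then both flags are derived from the counts (finished-count equals dict size; submitted-count positive).
import Mathlib
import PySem

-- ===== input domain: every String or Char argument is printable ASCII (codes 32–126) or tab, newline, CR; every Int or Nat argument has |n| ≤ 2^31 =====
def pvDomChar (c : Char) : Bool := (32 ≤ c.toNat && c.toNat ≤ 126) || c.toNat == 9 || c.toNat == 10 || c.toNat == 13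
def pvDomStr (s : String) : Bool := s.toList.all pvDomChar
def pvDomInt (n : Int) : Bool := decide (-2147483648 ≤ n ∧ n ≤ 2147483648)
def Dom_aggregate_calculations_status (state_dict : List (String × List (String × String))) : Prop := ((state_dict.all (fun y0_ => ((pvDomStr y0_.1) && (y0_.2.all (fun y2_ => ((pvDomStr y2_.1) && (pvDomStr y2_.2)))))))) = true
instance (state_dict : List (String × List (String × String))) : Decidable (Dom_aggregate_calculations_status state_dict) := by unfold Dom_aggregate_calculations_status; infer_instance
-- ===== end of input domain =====

-- B replaces A's flag-carrying scan with a tally-then-derive structure (frequency table of status values).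
-- ===== PORT A =====
-- cur_state.get("status") (first-match assoc-list lookup)
def pvGetStatus (kvs : List (String × String)) : Option String :=
  (PySem.Dict.mk kvs).get? "status"

-- one iteration of A's loop body (the two if-updates, in A's order)
def pvStepA (acc : Bool × Bool) (kv : String × List (String × String)) : Bool × Bool :=
  let status := pvGetStatus kv.2
  let is_all_finished := if status ≠ some "finished" then false else acc.1
  let is_any_submitted := if status = some "submitted" then true else acc.2
  (is_all_finished, is_any_submitted)

def aggregate_calculations_status (state_dict : List (String × List (String × String))) : Bool × Bool :=
  state_dict.foldl pvStepA (true, false)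

-- ===== PORT B =====
def aggregate_calculations_status_alt (state_dict : List (String × List (String × String))) : Bool × Bool :=
  let counts : PySem.Dict (Option String) Int :=
    state_dict.foldl (fun d kv =>
      let s := pvGetStatus kv.2
      d.insert s (d.getD s 0 + 1)) PySem.Dict.empty
  (decide (counts.getD (some "finished") 0 = (state_dict.length : Int)),
   decide (0 < counts.getD (some "submitted") 0))

-- ===== PRECONDITION & SPEC =====
def Spec_aggregate_calculations_status (state_dict : List (String × List (String × String))) (out : Bool × Bool) : Prop := out = aggregate_calculations_status_alt state_dict
instance (state_dict : List (String × List (String × String))) (out : Bool × Bool) : Decidable (Spec_aggregate_calculations_status state_dict out) := by unfold Spec_aggregate_calculations_status; infer_instance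

-- ===== CLAIM =====
def Claim_equal_aggregate_calculations_status : Prop := ∀ (state_dict : List (String × List (String × String))), Dom_aggregate_calculations_status state_dict → Spec_aggregate_calculations_status state_dict (aggregate_calculations_status state_dict)

-- ===== LEMMAS AND PROOFS =====

-- A's scan: the two flags are the obvious all/any over the status values.
theorem portA_foldl (l : List (String × List (String × String))) (b1 b2 : Bool) :
    l.foldl pvStepA (b1, b2)
    = (b1 && (l.map (fun kv => pvGetStatus kv.2)).all (fun s => s == some "finished"),
       b2 || (l.map (fun kv => pvGetStatus kv.2)).any (fun s => s == some "submitted")) := by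
  induction l generalizing b1 b2 with
  | nil => simp
  | cons h t ih =>
    rw [List.foldl_cons,
        show pvStepA (b1, b2) h
          = ((if pvGetStatus h.2 ≠ some "finished" then false else b1),
             (if pvGetStatus h.2 = some "submitted" then true else b2)) from rfl,
        ih]
    by_cases hf : pvGetStatus h.2 = some "finished"
    · have hs : ¬ pvGetStatus h.2 = some "submitted" := by rw [hf]; simp
      simp [hf, hs]
    · by_cases hs : pvGetStatus h.2 = some "submitted"
      · simp [hf, hs]
      · have hbf : (pvGetStatus h.2 == some "finished") = false := by simp [hf]
        have hbs : (pvGetStatus h.2 == some "submitted") = false := by simp [hs]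
        simp [hf, hs, hbf, hbs]

-- B's tally loop is Counter of the status values.
theorem portB_counts (l : List (String × List (String × String))) :
    l.foldl (fun (d : PySem.Dict (Option String) Int) kv =>
      let s := pvGetStatus kv.2
      d.insert s (d.getD s 0 + 1)) PySem.Dict.empty
    = PySem.Dict.counter (l.map (fun kv => pvGetStatus kv.2)) := by
  rw [← PySem.Dict.foldl_insert_getD_add_one_eq_counter, List.foldl_map]

theorem count_eq_len_iff_all (xs : List (Option String)) :
    decide ((xs.count (some "finished") : Int) = (xs.length : Int))
    = xs.all (fun s => s == some "finished") := by
  by_cases hall : ∀ s ∈ xs, s = some "finished"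
  · have hc : xs.count (some "finished") = xs.length :=
      List.count_eq_length.mpr (fun b hb => (hall b hb).symm)
    have ha : xs.all (fun s => s == some "finished") = true := by
      simp only [List.all_eq_true, beq_iff_eq]
      exact hall
    simp [hc, ha]
  · have hne : xs.count (some "finished") ≠ xs.length := by
      intro hc
      exact hall (fun s hs => ((List.count_eq_length.mp hc) s hs).symm)
    have ha : xs.all (fun s => s == some "finished") = false := by
      push_neg at hall
      obtain ⟨s, hsmem, hne2⟩ := hall
      simp only [List.all_eq_false]
      exact ⟨s, hsmem, by simp [hne2]⟩
    rw [ha]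
    apply decide_eq_false
    intro h
    exact hne (by exact_mod_cast h)

theorem count_pos_iff_any (xs : List (Option String)) :
    decide (0 < (xs.count (some "submitted") : Int))
    = xs.any (fun s => s == some "submitted") := by
  rcases h : xs.any (fun s => s == some "submitted") with _ | _
  · simp only [List.any_eq_false, beq_iff_eq] at h
    have : xs.count (some "submitted") = 0 := by
      rw [List.count_eq_zero]
      intro hm; exact h _ hm rfl
    simp [this]
  · simp only [List.any_eq_true, beq_iff_eq] at h
    obtain ⟨b, hb, hbe⟩ := h
    have : 0 < xs.count (some "submitted") := List.count_pos_iff.mpr (hbe ▸ hb)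
    simp only [decide_eq_true_eq]
    exact_mod_cast this

-- ===== VERDICT =====
theorem aggregate_calculations_status_spec : Claim_equal_aggregate_calculations_status := by
  intro sd _
  unfold Spec_aggregate_calculations_status aggregate_calculations_status aggregate_calculations_status_alt
  simp only [portA_foldl, portB_counts, PySem.Dict.getD_counter, Bool.true_and, Bool.false_or]
  have hlen : sd.length = (sd.map (fun kv => pvGetStatus kv.2)).length := by simp
  rw [hlen, count_eq_len_iff_all, count_pos_iff_any]
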